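-- pv_equiv track=rewrite | github.com/you4rin/ArtificialIntelligence | assignment1.py | hc
-- ===== SOURCE A (Python) =====
-- def hfunc(state):
--     ret=0
--     for i in range(len(state)):
--         for j in range(i+1,len(state)):
--             if state[i]==state[j]:ret+=1
--             elif abs(i-j)==abs(state[i]-state[j]):ret+=1
--     return ret
--
-- def hc(n,curstate,val):
--     while True:
--         if val==0:
--             return curstate
--         board=[[0 for _ in range(n)] for _ in range(n)]
--         y=x=None
--         nextval=val
--         for i in range(n):
--             for j in range(n):
--                 tmpstate=curstate[:]
--                 if(curstate[i]==j+1):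
--                     board[i][j]=val
--                     continue
--                 tmpstate[i]=j+1
--                 board[i][j]=hfunc(tmpstate)
--         for i in range(n):
--             for j in range(n):
--                 if board[i][j]<nextval:
--                     y,x=i,j
--                     nextval=board[i][j]
--         if y==None:
--             return None
--         curstate[y]=x+1
--         val=nextval
-- ===== SOURCE B (Python) =====
-- def hc(n, curstate, val):
--     # Delta evaluation: each neighbor's h is computed from the current h and the
--     # moved queen's own conflict counts, instead of re-scoring the whole board.
--     while True:
--         if val == 0:
--             return curstate
--
--         def conf(i, v):
--             # conflicts queen i would have with all other queens if placed at v
--             c = 0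
--             for k, w in enumerate(curstate):
--                 if k != i and (w == v or abs(i - k) == abs(v - w)):
--                     c += 1
--             return c
--
--         total = 0
--         for k in range(len(curstate)):
--             total += conf(k, curstate[k])
--         h0 = total // 2  # every conflicting pair was counted twice
--
--         best = None
--         nextval = val
--         for i in range(n):
--             old = conf(i, curstate[i])
--             for j in range(n):
--                 if curstate[i] == j + 1:
--                     continue
--                 cand = h0 - old + conf(i, j + 1)
--                 if cand < nextval:
--                     best = (i, j)
--                     nextval = cand
--         if best is None:
--             return None
--         curstate[best[0]] = best[1] + 1
--         val = nextval
-- ===== Notes on version B (the rewrite author's own statement) =====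
-- stated objective: faster
-- what changed: Instead of re-scoring the whole board with hfunc for every one of the n*n neighbor states (O(n^2) per score, O(n^4) per descent step), B computes the current conflict count once and evaluates each neighbor by a delta: subtract the moved queen's conflicts at its old square and add its conflicts at the new square (one O(n) scan per neighbor, O(n^3) per step).
import Mathlib
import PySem

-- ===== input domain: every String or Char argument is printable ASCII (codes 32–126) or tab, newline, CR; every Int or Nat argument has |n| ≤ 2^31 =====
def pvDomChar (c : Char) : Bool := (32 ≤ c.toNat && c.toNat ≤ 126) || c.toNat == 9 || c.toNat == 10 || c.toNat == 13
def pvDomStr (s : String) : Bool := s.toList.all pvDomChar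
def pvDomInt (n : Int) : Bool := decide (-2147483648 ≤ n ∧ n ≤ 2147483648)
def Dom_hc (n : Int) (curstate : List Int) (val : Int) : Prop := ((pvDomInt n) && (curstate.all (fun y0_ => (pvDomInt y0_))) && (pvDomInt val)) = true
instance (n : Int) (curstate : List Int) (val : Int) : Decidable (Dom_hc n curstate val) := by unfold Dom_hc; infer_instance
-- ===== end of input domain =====

-- B replaces A's full hfunc re-scoring of every neighbor (O(n^2) each) by delta scoring:
-- current conflicts minus the moved queen's old conflicts plus its new conflicts (one O(n)
-- scan each). Both Pythons mutate `curstate` in place; the theorems are about the return value.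

-- ===== PORT A =====
-- generic loop-invariant helpers used by the ports' termination proofs
theorem pv_le_foldl {α : Type} (f : Int → α → Int) :
    ∀ (l : List α), (∀ a x, a ≤ f a x) → ∀ a, a ≤ l.foldl f a := by
  intro l
  induction l with
  | nil => intro _ a; simp
  | cons x t ih => intro h a; exact le_trans (h a x) (ih h (f a x))

theorem pv_foldl_inv {α σ : Type} (f : σ → α → σ) (I : σ → Prop) :
    ∀ (l : List α), (∀ st a, a ∈ l → I st → I (f st a)) → ∀ st, I st → I (l.foldl f st) := by
  intro l
  induction l with
  | nil => intro _ st hst; simpa using hst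
  | cons x t ih =>
      intro h st hst
      exact ih (fun st a ha => h st a (List.mem_cons_of_mem _ ha)) (f st x)
        (h st x List.mem_cons_self hst)

def hfunc (state : List Int) : Int :=
  (PySem.List.pyRange 0 (PySem.List.len state) 1).foldl (fun ret i =>
    (PySem.List.pyRange (i + 1) (PySem.List.len state) 1).foldl (fun ret j =>
      if PySem.List.pyGetD state i 0 = PySem.List.pyGetD state j 0 then ret + 1
      else if |i - j| = |PySem.List.pyGetD state i 0 - PySem.List.pyGetD state j 0| then ret + 1
      else ret) ret) 0

theorem hfunc_nonneg (s : List Int) : 0 ≤ hfunc s := by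
  refine pv_le_foldl _ _ (fun a i => pv_le_foldl _ _ (fun a j => ?_) a) 0
  dsimp only; split_ifs <;> omega

def selectMin (cell : Int → Int → Int) (n val : Int) : Option (Int × Int) × Int :=
  (PySem.List.pyRange 0 n 1).foldl (fun st i =>
    (PySem.List.pyRange 0 n 1).foldl (fun st j =>
      if cell i j < st.2 then (some (i, j), cell i j) else st) st)
    ((none : Option (Int × Int)), val)

theorem selectMin_inv (cell : Int → Int → Int) (n val : Int)
    (hcell : ∀ i j, cell i j = val ∨ 0 ≤ cell i j) :
    selectMin cell n val = (none, val) ∨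
      (0 ≤ (selectMin cell n val).2 ∧ (selectMin cell n val).2 < val) := by
  unfold selectMin
  exact pv_foldl_inv _
    (fun st => st = ((none : Option (Int × Int)), val) ∨ (0 ≤ st.2 ∧ st.2 < val))
    (PySem.List.pyRange 0 n 1)
    (fun st i _ hst =>
      pv_foldl_inv _
        (fun st => st = ((none : Option (Int × Int)), val) ∨ (0 ≤ st.2 ∧ st.2 < val))
        (PySem.List.pyRange 0 n 1)
        (fun st j _ hst => by
          dsimp only
          split_ifs with h
          · right
            have hle : st.2 ≤ val := by
              rcases hst with h' | h'
              · rw [h']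
              · exact le_of_lt h'.2
            rcases hcell i j with hcv | hcv
            · exfalso; rw [hcv] at h; omega
            · exact ⟨hcv, lt_of_lt_of_le h hle⟩
          · exact hst) st hst)
    (none, val) (Or.inl rfl)

theorem pv_cell_cases (P : Int → Prop) (li lj : List Int) (f : Int → Int → Int)
    (h0 : P 0) (hf : ∀ a b, P (f a b)) (i j : Int) :
    P (PySem.List.pyGetD (PySem.List.pyGetD (li.map (fun a => lj.map (f a))) i []) j 0) := by
  by_cases hi : PySem.Raise.InRange (li.map (fun a => lj.map (f a))).length i
  · have hrow := PySem.List.pyGetD_mem (xs := li.map (fun a => lj.map (f a))) ([] : List Int) hi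
    rcases List.mem_map.1 hrow with ⟨a, _, ha⟩
    rw [← ha]
    by_cases hj : PySem.Raise.InRange (lj.map (f a)).length j
    · have helem := PySem.List.pyGetD_mem (xs := lj.map (f a)) (0 : Int) hj
      rcases List.mem_map.1 helem with ⟨b, _, hb⟩
      rw [← hb]; exact hf a b
    · rw [PySem.List.pyGetD_of_none _ _ _ ((PySem.List.pyGet?_eq_none_iff _ _).2 hj)]
      exact h0
  · rw [PySem.List.pyGetD_of_none _ _ _ ((PySem.List.pyGet?_eq_none_iff _ _).2 hi)]
    by_cases hj : PySem.Raise.InRange ([] : List Int).length j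
    · have := PySem.List.pyGetD_mem (xs := ([] : List Int)) (0 : Int) hj
      simp at this
    · rw [PySem.List.pyGetD_of_none _ _ _ ((PySem.List.pyGet?_eq_none_iff _ _).2 hj)]
      exact h0

def boardA (n : Int) (curstate : List Int) (val : Int) : List (List Int) :=
  (PySem.List.pyRange 0 n 1).map (fun i =>
    (PySem.List.pyRange 0 n 1).map (fun j =>
      if PySem.List.pyGetD curstate i 0 = j + 1 then val
      else hfunc (PySem.List.pySetD curstate i (j + 1))))

def selA (n : Int) (curstate : List Int) (val : Int) : Option (Int × Int) × Int :=
  selectMin (fun i j =>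
    PySem.List.pyGetD (PySem.List.pyGetD (boardA n curstate val) i []) j 0) n val

theorem selA_some (n : Int) (s : List Int) (val : Int) (yx : Int × Int)
    (hr : (selA n s val).1 = some yx) :
    0 ≤ (selA n s val).2 ∧ (selA n s val).2 < val := by
  have hcell : ∀ i j : Int,
      PySem.List.pyGetD (PySem.List.pyGetD (boardA n s val) i []) j 0 = val ∨
      0 ≤ PySem.List.pyGetD (PySem.List.pyGetD (boardA n s val) i []) j 0 := by
    intro i j
    unfold boardA
    exact pv_cell_cases (fun z => z = val ∨ 0 ≤ z)
      (PySem.List.pyRange 0 n 1) (PySem.List.pyRange 0 n 1)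
      (fun a b => if PySem.List.pyGetD s a 0 = b + 1 then val
                  else hfunc (PySem.List.pySetD s a (b + 1)))
      (Or.inr le_rfl)
      (fun a b => by
        dsimp only
        split_ifs
        exacts [Or.inl rfl, Or.inr (hfunc_nonneg _)]) i j
  rcases selectMin_inv _ n val hcell with h | h
  · unfold selA at hr
    rw [h] at hr
    simp at hr
  · exact h

def hc (n : Int) (curstate : List Int) (val : Int) : Option (List Int) :=
  if val = 0 then some curstate
  else
    match hr : (selA n curstate val).1 with
    | none => none
    | some yx => hc n (PySem.List.pySetD curstate yx.1 (yx.2 + 1)) (selA n curstate val).2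
termination_by val.toNat
decreasing_by
  have h := selA_some n curstate val yx hr
  omega

-- ===== PORT B =====
def conf (curstate : List Int) (i v : Int) : Int :=
  (PySem.List.enumerate curstate).foldl
    (fun c kw => if kw.1 ≠ i ∧ (kw.2 = v ∨ |i - kw.1| = |v - kw.2|) then c + 1 else c) 0

theorem conf_eq_countP (s : List Int) (i v : Int) :
    conf s i v = ((PySem.List.enumerate s 0).countP
      (fun kw => decide (kw.1 ≠ i ∧ (kw.2 = v ∨ |i - kw.1| = |v - kw.2|))) : Int) := by
  unfold conf
  rw [PySem.List.foldl_ite_add_one]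
  simp

theorem conf_nonneg (s : List Int) (i v : Int) : 0 ≤ conf s i v := by
  rw [conf_eq_countP]; exact_mod_cast Nat.zero_le _

theorem conf_le_len (s : List Int) (i v : Int) : conf s i v ≤ (s.length : Int) := by
  rw [conf_eq_countP]
  have h := List.countP_le_length
    (p := fun kw : Int × Int => decide (kw.1 ≠ i ∧ (kw.2 = v ∨ |i - kw.1| = |v - kw.2|)))
    (l := PySem.List.enumerate s 0)
  rw [PySem.List.length_enumerate] at h
  exact_mod_cast h

def totalB (curstate : List Int) : Int :=
  (PySem.List.pyRange 0 (PySem.List.len curstate) 1).foldl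
    (fun t k => t + conf curstate k (PySem.List.pyGetD curstate k 0)) 0

def h0B (curstate : List Int) : Int := PySem.Int.floordiv (totalB curstate) 2

theorem totalB_nonneg (s : List Int) : 0 ≤ totalB s := by
  unfold totalB
  rw [PySem.List.foldl_add]
  refine le_add_of_nonneg_of_le le_rfl (List.sum_nonneg ?_)
  intro x hx
  rcases List.mem_map.1 hx with ⟨k, _, hk⟩
  rw [← hk]; exact conf_nonneg _ _ _

theorem h0B_nonneg (s : List Int) : 0 ≤ h0B s := by
  unfold h0B
  rw [PySem.Int.floordiv_eq_ediv_of_pos (by norm_num)]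
  exact Int.ediv_nonneg (totalB_nonneg s) (by norm_num)

def selB (n : Int) (curstate : List Int) (val : Int) : Option (Int × Int) × Int :=
  (PySem.List.pyRange 0 n 1).foldl (fun st i =>
    let old := conf curstate i (PySem.List.pyGetD curstate i 0)
    (PySem.List.pyRange 0 n 1).foldl (fun st j =>
      if PySem.List.pyGetD curstate i 0 = j + 1 then st
      else if h0B curstate - old + conf curstate i (j + 1) < st.2 then
        (some (i, j), h0B curstate - old + conf curstate i (j + 1))
      else st) st)
    ((none : Option (Int × Int)), val)

theorem selB_some (n : Int) (s : List Int) (val : Int) (yx : Int × Int)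
    (hr : (selB n s val).1 = some yx) :
    -(s.length : Int) ≤ (selB n s val).2 ∧ (selB n s val).2 < val := by
  have hI : selB n s val = ((none : Option (Int × Int)), val) ∨
      (-(s.length : Int) ≤ (selB n s val).2 ∧ (selB n s val).2 < val) := by
    unfold selB
    exact pv_foldl_inv _
      (fun st => st = ((none : Option (Int × Int)), val) ∨
        (-(s.length : Int) ≤ st.2 ∧ st.2 < val))
      (PySem.List.pyRange 0 n 1)
      (fun st i _ hst =>
        pv_foldl_inv _
          (fun st => st = ((none : Option (Int × Int)), val) ∨
            (-(s.length : Int) ≤ st.2 ∧ st.2 < val))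
          (PySem.List.pyRange 0 n 1)
          (fun st j _ hst => by
            dsimp only
            split_ifs with h1 h2
            · exact hst
            · right
              have hle : st.2 ≤ val := by
                rcases hst with h' | h'
                · rw [h']
                · exact le_of_lt h'.2
              have hb1 := h0B_nonneg s
              have hb2 := conf_le_len s i (PySem.List.pyGetD s i 0)
              have hb3 := conf_nonneg s i (j + 1)
              dsimp only
              constructor
              · omega
              · omega
            · exact hst) st hst)
      (none, val) (Or.inl rfl)
  rcases hI with h | h
  · rw [h] at hr; simp at hr
  · exact h

def hc_alt (n : Int) (curstate : List Int) (val : Int) : Option (List Int) :=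
  if val = 0 then some curstate
  else
    match hr : (selB n curstate val).1 with
    | none => none
    | some yx => hc_alt n (PySem.List.pySetD curstate yx.1 (yx.2 + 1)) (selB n curstate val).2
termination_by (val + curstate.length).toNat
decreasing_by
  have h := selB_some n curstate val yx hr
  simp only [PySem.List.length_pySetD]
  omega

-- ===== PRECONDITION & SPEC =====
-- Pre_hc excludes exactly the inputs where the Python A raises IndexError:
-- when val ≠ 0 and n > len(curstate), A reads curstate[i] for some i ≥ len(curstate).
def Pre_hc (n : Int) (curstate : List Int) (val : Int) : Prop :=
  val = 0 ∨ n ≤ (curstate.length : Int)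
instance (n : Int) (curstate : List Int) (val : Int) : Decidable (Pre_hc n curstate val) := by
  unfold Pre_hc; infer_instance

def pvWitness_hc : Int × List Int × Int := (4, [1, 1, 1, 1], 6)

def Spec_hc (n : Int) (curstate : List Int) (val : Int) (out : Option (List Int)) : Prop :=
  out = hc_alt n curstate val
instance (n : Int) (curstate : List Int) (val : Int) (out : Option (List Int)) :
    Decidable (Spec_hc n curstate val out) := by unfold Spec_hc; infer_instance

-- ===== CLAIM (what is proved, stated in full; the proofs are below) =====
def Claim_equal_hc : Prop := ∀ (n : Int) (curstate : List Int) (val : Int),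
  Dom_hc n curstate val → Pre_hc n curstate val → Spec_hc n curstate val (hc n curstate val)

-- ===== LEMMAS AND PROOFS =====
theorem pv_foldl_congr_inv {α σ : Type} (f g : σ → α → σ) (I : σ → Prop) :
    ∀ (l : List α), (∀ st a, a ∈ l → I st → I (f st a)) →
      (∀ st a, a ∈ l → I st → f st a = g st a) →
      ∀ st, I st → l.foldl f st = l.foldl g st := by
  intro l
  induction l with
  | nil => intros; simp
  | cons x t ih =>
      intro hI hfg st hst
      rw [List.foldl_cons, List.foldl_cons, ← hfg st x List.mem_cons_self hst]
      exact ih (fun st a ha => hI st a (List.mem_cons_of_mem _ ha))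
        (fun st a ha => hfg st a (List.mem_cons_of_mem _ ha))
        (f st x) (hI st x List.mem_cons_self hst)

theorem pv_sum_map_range (f : Nat → Int) : ∀ (m : Nat),
    ((List.range m).map f).sum = ∑ k ∈ Finset.range m, f k := by
  intro m
  induction m with
  | zero => simp
  | succ m ih =>
      rw [List.range_succ, List.map_append, List.sum_append, Finset.sum_range_succ, ih]
      simp

theorem pv_sum_pyRange (g : Int → Int) (a b : Int) :
    ((PySem.List.pyRange a b 1).map g).sum
      = ∑ k ∈ Finset.range (b - a).toNat, g (a + (k : Int)) := by
  rw [PySem.List.pyRange_one, List.map_map]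
  exact pv_sum_map_range (fun k => g (a + (k : Int))) _

-- abstract (index → value) layer for the conflict-counting mathematics
def piF (u : Nat → Int) (x y : Nat) : Int :=
  if u x = u y ∨ |(x : Int) - y| = |u x - u y| then 1 else 0

def FgF (L : Nat) (u : Nat → Int) : Int :=
  ∑ x ∈ Finset.range L, ∑ y ∈ Finset.Ico (x + 1) L, piF u x y

def CgF (L : Nat) (u : Nat → Int) (a : Nat) (v : Int) : Int :=
  ∑ k ∈ Finset.range L, if k ≠ a ∧ (u k = v ∨ |(a : Int) - k| = |v - u k|) then 1 else 0

def RestF (L : Nat) (u : Nat → Int) (a : Nat) : Int :=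
  ∑ x ∈ Finset.range L, ∑ y ∈ Finset.Ico (x + 1) L,
    if x = a ∨ y = a then 0 else piF u x y

def eF (s : List Int) : Nat → Int := fun k => s.getD k 0

theorem hfunc_eq (s : List Int) : hfunc s = FgF s.length (eF s) := by
  unfold hfunc FgF
  rw [PySem.List.len_eq]
  have hstep : (fun (ret i : Int) =>
      (PySem.List.pyRange (i + 1) ((s.length : Int)) 1).foldl
        (fun ret j => if PySem.List.pyGetD s i 0 = PySem.List.pyGetD s j 0 then ret + 1
          else if |i - j| = |PySem.List.pyGetD s i 0 - PySem.List.pyGetD s j 0| then ret + 1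
          else ret) ret)
      = fun (ret i : Int) => ret +
        ((PySem.List.pyRange (i + 1) ((s.length : Int)) 1).map
          (fun j => if PySem.List.pyGetD s i 0 = PySem.List.pyGetD s j 0 ∨
              |i - j| = |PySem.List.pyGetD s i 0 - PySem.List.pyGetD s j 0| then (1 : Int) else 0)).sum := by
    funext ret i
    rw [show (fun (ret j : Int) =>
          if PySem.List.pyGetD s i 0 = PySem.List.pyGetD s j 0 then ret + 1
          else if |i - j| = |PySem.List.pyGetD s i 0 - PySem.List.pyGetD s j 0| then ret + 1
          else ret)
        = fun (ret j : Int) => ret + (if PySem.List.pyGetD s i 0 = PySem.List.pyGetD s j 0 ∨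
              |i - j| = |PySem.List.pyGetD s i 0 - PySem.List.pyGetD s j 0| then (1 : Int) else 0) from
      funext fun ret => funext fun j => by
        by_cases h1 : PySem.List.pyGetD s i 0 = PySem.List.pyGetD s j 0
        · rw [if_pos h1, if_pos (Or.inl h1)]
        · rw [if_neg h1]
          by_cases h2 : |i - j| = |PySem.List.pyGetD s i 0 - PySem.List.pyGetD s j 0|
          · rw [if_pos h2, if_pos (Or.inr h2)]
          · rw [if_neg h2, if_neg (show ¬(PySem.List.pyGetD s i 0 = PySem.List.pyGetD s j 0 ∨
                |i - j| = |PySem.List.pyGetD s i 0 - PySem.List.pyGetD s j 0|) from by tauto)]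
            ring]
    rw [PySem.List.foldl_add]
  rw [hstep, PySem.List.foldl_add, zero_add, pv_sum_pyRange]
  have hL : (((s.length : Int)) - 0).toNat = s.length := by omega
  rw [hL]
  refine Finset.sum_congr rfl (fun x hx => ?_)
  have hxL : x < s.length := Finset.mem_range.1 hx
  simp only [zero_add]
  rw [pv_sum_pyRange, Finset.sum_Ico_eq_sum_range]
  have h1 : (((s.length : Int)) - ((x : Int) + 1)).toNat = s.length - (x + 1) := by omega
  rw [h1]
  refine Finset.sum_congr rfl (fun k _ => ?_)
  have hj : ((x : Int) + 1 + (k : Int)) = (((x + 1 + k : Nat)) : Int) := by push_cast; ring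
  rw [hj, PySem.List.pyGetD_natCast, PySem.List.pyGetD_natCast]
  unfold piF eF
  norm_cast

theorem conf_eq_sum (s : List Int) (i v : Int) :
    conf s i v = ∑ k ∈ Finset.range s.length,
      (if ((k : Int)) ≠ i ∧ (eF s k = v ∨ |i - (k : Int)| = |v - eF s k|) then (1 : Int) else 0) := by
  have key : ∀ (t : List Int) (st c : Int),
      (PySem.List.enumerate t st).foldl
        (fun c kw => if kw.1 ≠ i ∧ (kw.2 = v ∨ |i - kw.1| = |v - kw.2|) then c + 1 else c) c
      = c + ∑ k ∈ Finset.range t.length,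
          (if (st + (k : Int)) ≠ i ∧ (eF t k = v ∨ |i - (st + (k : Int))| = |v - eF t k|)
           then (1 : Int) else 0) := by
    intro t
    induction t with
    | nil => intro st c; simp [PySem.List.enumerate]
    | cons x tl ih =>
        intro st c
        rw [show PySem.List.enumerate (x :: tl) st = (st, x) :: PySem.List.enumerate tl (st + 1) from by
          simp [PySem.List.enumerate]]
        rw [List.foldl_cons, ih (st + 1)]
        rw [List.length_cons, Finset.sum_range_succ']
        have hsum : ∑ k ∈ Finset.range tl.length,
            (if (st + (((k + 1 : Nat)) : Int)) ≠ i ∧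
                (eF (x :: tl) (k + 1) = v ∨ |i - (st + (((k + 1 : Nat)) : Int))| = |v - eF (x :: tl) (k + 1)|)
             then (1 : Int) else 0)
          = ∑ k ∈ Finset.range tl.length,
            (if (st + 1 + (k : Int)) ≠ i ∧ (eF tl k = v ∨ |i - (st + 1 + (k : Int))| = |v - eF tl k|)
             then (1 : Int) else 0) := by
          refine Finset.sum_congr rfl fun k _ => ?_
          have h1 : (st + (((k + 1 : Nat)) : Int)) = st + 1 + (k : Int) := by push_cast; ring
          have h2 : eF (x :: tl) (k + 1) = eF tl k := rfl
          rw [h1, h2]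
        rw [hsum]
        simp only [Nat.cast_zero, add_zero]
        by_cases hp : st ≠ i ∧ (x = v ∨ |i - st| = |v - x|)
        · rw [if_pos hp, if_pos (show (st ≠ i ∧ (eF (x :: tl) 0 = v ∨ |i - st| = |v - eF (x :: tl) 0|)) from hp)]
          ring
        · rw [if_neg hp, if_neg (show ¬(st ≠ i ∧ (eF (x :: tl) 0 = v ∨ |i - st| = |v - eF (x :: tl) 0|)) from hp)]
          ring
  unfold conf
  rw [key s 0 0]
  simp only [zero_add]

theorem conf_natCast (s : List Int) (a : Nat) (v : Int) :
    conf s (a : Int) v = CgF s.length (eF s) a v := by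
  rw [conf_eq_sum]
  unfold CgF
  refine Finset.sum_congr rfl fun k _ => ?_
  simp only [ne_eq, Nat.cast_inj]

theorem pv_triangle (L : Nat) (h : Nat → Nat → Int) :
    ∑ a ∈ Finset.range L, ∑ k ∈ Finset.range a, h k a
      = ∑ k ∈ Finset.range L, ∑ a ∈ Finset.Ico (k + 1) L, h k a := by
  induction L with
  | zero => simp
  | succ L ih =>
      rw [Finset.sum_range_succ, ih, Finset.sum_range_succ]
      have hsplit : ∀ k ∈ Finset.range L,
          ∑ a ∈ Finset.Ico (k + 1) (L + 1), h k a
            = ∑ a ∈ Finset.Ico (k + 1) L, h k a + h k L := fun k hk =>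
        Finset.sum_Ico_succ_top (Nat.succ_le_of_lt (Finset.mem_range.1 hk)) _
      rw [Finset.sum_congr rfl hsplit, Finset.sum_add_distrib]
      simp

theorem sum_Cg_diag (L : Nat) (u : Nat → Int) :
    ∑ a ∈ Finset.range L, CgF L u a (u a) = 2 * FgF L u := by
  unfold CgF FgF
  have hsym : ∀ a k : Nat,
      ((if k ≠ a ∧ (u k = u a ∨ |(a : Int) - k| = |u a - u k|) then (1 : Int) else 0))
      = ((if a ≠ k ∧ (u a = u k ∨ |(k : Int) - a| = |u k - u a|) then (1 : Int) else 0)) := by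
    intro a k
    refine if_congr ⟨?_, ?_⟩ rfl rfl
    · rintro ⟨h1, h2⟩
      refine ⟨fun h => h1 h.symm, ?_⟩
      rcases h2 with h | h
      · exact Or.inl h.symm
      · right; rw [abs_sub_comm ((k : Int)) (a : Int), abs_sub_comm (u k) (u a)]; exact h
    · rintro ⟨h1, h2⟩
      refine ⟨fun h => h1 h.symm, ?_⟩
      rcases h2 with h | h
      · exact Or.inl h.symm
      · right; rw [abs_sub_comm ((a : Int)) (k : Int), abs_sub_comm (u a) (u k)]; exact h
  have hpi : ∀ a : Nat, ∀ k ∈ Finset.Ico (a + 1) L,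
      ((if k ≠ a ∧ (u k = u a ∨ |(a : Int) - k| = |u a - u k|) then (1 : Int) else 0)) = piF u a k := by
    intro a k hk
    have hak : a < k := by have := Finset.mem_Ico.1 hk; omega
    unfold piF
    refine if_congr ⟨?_, ?_⟩ rfl rfl
    · rintro ⟨_, h2⟩
      rcases h2 with h | h
      · exact Or.inl h.symm
      · exact Or.inr h
    · rintro h2
      refine ⟨by omega, ?_⟩
      rcases h2 with h | h
      · exact Or.inl h.symm
      · exact Or.inr h
  have hsplit : ∀ a ∈ Finset.range L,
      (∑ k ∈ Finset.range L,
        (if k ≠ a ∧ (u k = u a ∨ |(a : Int) - k| = |u a - u k|) then (1 : Int) else 0))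
      = (∑ k ∈ Finset.range a,
          (if k ≠ a ∧ (u k = u a ∨ |(a : Int) - k| = |u a - u k|) then (1 : Int) else 0))
        + ∑ k ∈ Finset.Ico (a + 1) L, piF u a k := by
    intro a haL
    have ha : a < L := Finset.mem_range.1 haL
    rw [Finset.range_eq_Ico,
      ← Finset.sum_Ico_consecutive _ (Nat.zero_le a) (le_of_lt ha),
      Finset.sum_eq_sum_Ico_succ_bot ha]
    rw [show (if a ≠ a ∧ (u a = u a ∨ |(a : Int) - a| = |u a - u a|) then (1 : Int) else 0) = 0 from by simp]
    rw [zero_add, ← Finset.range_eq_Ico]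
    congr 1
    exact Finset.sum_congr rfl (hpi a)
  rw [Finset.sum_congr rfl hsplit, Finset.sum_add_distrib]
  have htri : ∑ a ∈ Finset.range L, ∑ k ∈ Finset.range a,
      (if k ≠ a ∧ (u k = u a ∨ |(a : Int) - k| = |u a - u k|) then (1 : Int) else 0)
      = ∑ a ∈ Finset.range L, ∑ k ∈ Finset.Ico (a + 1) L, piF u a k := by
    rw [pv_triangle L (fun k a =>
      (if k ≠ a ∧ (u k = u a ∨ |(a : Int) - k| = |u a - u k|) then (1 : Int) else 0))]
    refine Finset.sum_congr rfl fun k _ => Finset.sum_congr rfl fun a ha => ?_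
    rw [hsym a k]
    exact hpi k a ha
  rw [htri]
  ring

theorem h0B_eq (s : List Int) : h0B s = FgF s.length (eF s) := by
  unfold h0B totalB
  rw [PySem.List.len_eq, PySem.List.foldl_add, zero_add, pv_sum_pyRange]
  have hL : (((s.length : Int)) - 0).toNat = s.length := by omega
  rw [hL]
  have hterm : ∀ k ∈ Finset.range s.length,
      conf s (0 + (k : Int)) (PySem.List.pyGetD s (0 + (k : Int)) 0)
        = CgF s.length (eF s) k (eF s k) := by
    intro k _
    simp only [zero_add]
    rw [PySem.List.pyGetD_natCast, conf_natCast]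
    rfl
  rw [Finset.sum_congr rfl hterm, sum_Cg_diag]
  rw [PySem.Int.floordiv_eq_ediv_of_pos (by norm_num)]
  exact Int.mul_ediv_cancel_left _ (by norm_num)

theorem Cg_congr (L : Nat) (u u' : Nat → Int) (a : Nat) (v : Int)
    (h : ∀ k, k ≠ a → u k = u' k) : CgF L u a v = CgF L u' a v := by
  unfold CgF
  refine Finset.sum_congr rfl fun k _ => ?_
  by_cases hk : k = a
  · simp [hk]
  · rw [h k hk]

theorem Rest_congr (L : Nat) (u u' : Nat → Int) (a : Nat)
    (h : ∀ k, k ≠ a → u k = u' k) : RestF L u a = RestF L u' a := by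
  unfold RestF
  refine Finset.sum_congr rfl fun x _ => Finset.sum_congr rfl fun y _ => ?_
  by_cases h1 : x = a
  · simp [h1]
  · by_cases h2 : y = a
    · simp [h2]
    · rw [if_neg (by tauto), if_neg (by tauto)]
      unfold piF
      rw [h x h1, h y h2]

theorem Fg_split (L : Nat) (u : Nat → Int) (a : Nat) (ha : a < L) :
    FgF L u = RestF L u a + CgF L u a (u a) := by
  unfold FgF RestF
  have h1 : ∀ x ∈ Finset.range L, ∑ y ∈ Finset.Ico (x + 1) L, piF u x y
      = ∑ y ∈ Finset.Ico (x + 1) L, ((if x = a ∨ y = a then 0 else piF u x y)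
          + ((if x = a then piF u x y else 0) + (if y = a then piF u x y else 0))) := by
    intro x _
    refine Finset.sum_congr rfl fun y hy => ?_
    have hxy : x < y := by have := Finset.mem_Ico.1 hy; omega
    by_cases hx : x = a <;> by_cases hy2 : y = a
    · exact absurd (hx.trans hy2.symm) (Nat.ne_of_lt hxy)
    · simp [hx, hy2]
    · simp [hx, hy2]
    · simp [hx, hy2]
  rw [Finset.sum_congr rfl h1]
  simp only [Finset.sum_add_distrib]
  congr 1
  have hRow : ∑ x ∈ Finset.range L, ∑ y ∈ Finset.Ico (x + 1) L, (if x = a then piF u x y else 0)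
      = ∑ y ∈ Finset.Ico (a + 1) L, piF u a y := by
    have hin : ∀ x ∈ Finset.range L,
        ∑ y ∈ Finset.Ico (x + 1) L, (if x = a then piF u x y else 0)
        = (if x = a then ∑ y ∈ Finset.Ico (a + 1) L, piF u a y else 0) := by
      intro x _
      by_cases hx : x = a
      · subst hx; simp
      · simp [hx]
    rw [Finset.sum_congr rfl hin,
      Finset.sum_ite_eq' (Finset.range L) a (fun _ => ∑ y ∈ Finset.Ico (a + 1) L, piF u a y),
      if_pos (Finset.mem_range.2 ha)]
  have hCol : ∑ x ∈ Finset.range L, ∑ y ∈ Finset.Ico (x + 1) L, (if y = a then piF u x y else 0)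
      = ∑ x ∈ Finset.range L, (if x < a then piF u x a else 0) := by
    refine Finset.sum_congr rfl fun x _ => ?_
    rw [Finset.sum_ite_eq' (Finset.Ico (x + 1) L) a (fun y => piF u x y)]
    by_cases hx : x < a
    · rw [if_pos (Finset.mem_Ico.2 ⟨by omega, ha⟩), if_pos hx]
    · rw [if_neg (by simp [Finset.mem_Ico]; omega), if_neg hx]
  rw [hRow, hCol]
  unfold CgF
  have hCg : ∀ k ∈ Finset.range L,
      (if k ≠ a ∧ (u k = u a ∨ |(a : Int) - k| = |u a - u k|) then (1 : Int) else 0)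
      = (if k < a then piF u k a else 0) + (if a < k then piF u a k else 0) := by
    intro k _
    rcases Nat.lt_trichotomy k a with h | h | h
    · have hka : ¬ a < k := by omega
      rw [if_pos h, if_neg hka, add_zero]
      unfold piF
      refine if_congr ⟨?_, ?_⟩ rfl rfl
      · rintro ⟨_, hor⟩
        rcases hor with h' | h'
        · exact Or.inl h'
        · right; rw [abs_sub_comm ((k : Int)) (a : Int), abs_sub_comm (u k) (u a)]; exact h'
      · rintro hor
        refine ⟨by omega, ?_⟩
        rcases hor with h' | h'
        · exact Or.inl h'
        · right; rw [abs_sub_comm ((a : Int)) (k : Int), abs_sub_comm (u a) (u k)]; exact h'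
    · subst h; simp
    · have hka : ¬ k < a := by omega
      rw [if_neg hka, if_pos h, zero_add]
      unfold piF
      refine if_congr ⟨?_, ?_⟩ rfl rfl
      · rintro ⟨_, hor⟩
        rcases hor with h' | h'
        · exact Or.inl h'.symm
        · exact Or.inr h'
      · rintro hor
        refine ⟨by omega, ?_⟩
        rcases hor with h' | h'
        · exact Or.inl h'.symm
        · exact Or.inr h'
  rw [Finset.sum_congr rfl hCg, Finset.sum_add_distrib]
  have hR2 : ∑ k ∈ Finset.range L, (if a < k then piF u a k else 0)
      = ∑ y ∈ Finset.Ico (a + 1) L, piF u a y := by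
    rw [← Finset.sum_filter]
    refine Finset.sum_congr ?_ (fun _ _ => rfl)
    ext k
    simp only [Finset.mem_filter, Finset.mem_range, Finset.mem_Ico]
    omega
  rw [hR2]
  exact add_comm _ _

theorem Fg_update (L : Nat) (u : Nat → Int) (a : Nat) (v : Int) (ha : a < L) :
    FgF L (Function.update u a v) = FgF L u - CgF L u a (u a) + CgF L u a v := by
  have h1 := Fg_split L (Function.update u a v) a ha
  have h2 := Fg_split L u a ha
  have hrest : RestF L (Function.update u a v) a = RestF L u a :=
    Rest_congr L _ u a (fun k hk => by simp [hk])
  have hCgv : CgF L (Function.update u a v) a (Function.update u a v a) = CgF L u a v := by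
    have hva : Function.update u a v a = v := by simp
    rw [hva]
    exact Cg_congr L _ u a v (fun k hk => by simp [hk])
  rw [h1, hrest, hCgv, h2]
  ring

theorem cell_eq (s : List Int) (i j : Int) (hi0 : 0 ≤ i) (hi1 : i < (s.length : Int)) :
    hfunc (PySem.List.pySetD s i (j + 1)) =
      h0B s - conf s i (PySem.List.pyGetD s i 0) + conf s i (j + 1) := by
  obtain ⟨a, rfl⟩ : ∃ a : Nat, ((a : Int)) = i := ⟨i.toNat, Int.toNat_of_nonneg hi0⟩
  have haL : a < s.length := by exact_mod_cast hi1
  rw [PySem.List.pySetD_natCast]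
  rw [hfunc_eq]
  have hlen : (s.set a (j + 1)).length = s.length := by simp
  rw [hlen]
  have heq : eF (s.set a (j + 1)) = Function.update (eF s) a (j + 1) := by
    funext k
    simp only [eF, Function.update_apply]
    by_cases hk : k = a
    · subst hk
      simp [List.getD_eq_getElem?_getD, haL]
    · have hk' : a ≠ k := Ne.symm hk
      simp [List.getD_eq_getElem?_getD, hk, hk']
  rw [heq, Fg_update s.length (eF s) a (j + 1) haL]
  rw [h0B_eq]
  have hc1 : conf s ((a : Int)) (j + 1) = CgF s.length (eF s) a (j + 1) := conf_natCast s a (j + 1)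
  have hc2 : conf s ((a : Int)) (PySem.List.pyGetD s ((a : Int)) 0)
      = CgF s.length (eF s) a (eF s a) := by
    rw [PySem.List.pyGetD_natCast, conf_natCast]
    rfl
  rw [hc1, hc2]

theorem sel_eq (n : Int) (s : List Int) (val : Int) (hn : n ≤ (s.length : Int)) :
    selA n s val = selB n s val := by
  unfold selA selB selectMin boardA
  refine pv_foldl_congr_inv _ _ (fun st => st.2 ≤ val) _ ?_ ?_ _ le_rfl
  · intro st i _ hst
    refine pv_foldl_inv _ (fun st => st.2 ≤ val) _ (fun st j _ hst => ?_) st hst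
    dsimp only
    split_ifs with h
    · exact le_of_lt (lt_of_lt_of_le h hst)
    · exact hst
  · intro st i hi hst
    have hi' := PySem.List.mem_pyRange_one.1 hi
    refine pv_foldl_congr_inv _ _ (fun st => st.2 ≤ val) _ ?_ ?_ st hst
    · intro st j _ hst
      dsimp only
      split_ifs with h
      · exact le_of_lt (lt_of_lt_of_le h hst)
      · exact hst
    · intro st j hj hst
      have hj' := PySem.List.mem_pyRange_one.1 hj
      dsimp only
      have hcellA : PySem.List.pyGetD
          (PySem.List.pyGetD ((PySem.List.pyRange 0 n 1).map (fun i =>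
            (PySem.List.pyRange 0 n 1).map (fun j =>
              if PySem.List.pyGetD s i 0 = j + 1 then val
              else hfunc (PySem.List.pySetD s i (j + 1))))) i []) j 0
          = if PySem.List.pyGetD s i 0 = j + 1 then val
            else hfunc (PySem.List.pySetD s i (j + 1)) := by
        rw [PySem.List.pyGetD_map_pyRange_of_nonneg _ n i _ hi'.1 hi'.2]
        rw [PySem.List.pyGetD_map_pyRange_of_nonneg _ n j _ hj'.1 hj'.2]
      simp only [hcellA]
      by_cases hskip : PySem.List.pyGetD s i 0 = j + 1
      · simp only [if_pos hskip]
        rw [if_neg (not_lt.2 hst)]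
      · simp only [if_neg hskip]
        simp only [cell_eq s i j hi'.1 (lt_of_lt_of_le hi'.2 hn)]

theorem main_aux : ∀ (k : Nat) (n : Int) (s : List Int) (val : Int), val.toNat ≤ k →
    Pre_hc n s val → hc n s val = hc_alt n s val := by
  intro k
  induction k with
  | zero =>
      intro n s val hk hpre
      rw [hc.eq_def, hc_alt.eq_def]
      by_cases hval : val = 0
      · simp only [if_pos hval]
      · have hn : n ≤ (s.length : Int) := hpre.resolve_left hval
        have hvle : val ≤ 0 := by omega
        simp only [if_neg hval]
        rw [sel_eq n s val hn]
        split
        · rfl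
        · rename_i yx h1
          have hpos := selA_some n s val yx (by rw [sel_eq n s val hn]; exact h1)
          exact absurd hpos.2 (not_lt.2 (le_trans hvle hpos.1))
  | succ k ih =>
      intro n s val hk hpre
      rw [hc.eq_def, hc_alt.eq_def]
      by_cases hval : val = 0
      · simp only [if_pos hval]
      · have hn : n ≤ (s.length : Int) := hpre.resolve_left hval
        simp only [if_neg hval]
        rw [sel_eq n s val hn]
        split
        · rfl
        · rename_i yx h1
          have hpos := selA_some n s val yx (by rw [sel_eq n s val hn]; exact h1)
          rw [sel_eq n s val hn] at hpos
          exact ih n (PySem.List.pySetD s yx.1 (yx.2 + 1)) (selB n s val).2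
            (by omega)
            (Or.inr (by rw [PySem.List.length_pySetD]; exact hn))

-- ===== VERDICT (by name: the statement is the Claim_ definition above) =====
theorem hc_spec : Claim_equal_hc := by
  intro n curstate val _ hpre
  unfold Spec_hc
  exact main_aux val.toNat n curstate val le_rfl hpre
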